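-- pv_equiv track=rewrite | github.com/zackjohnson298/AdventOfCode | 2023/Day12/Part1.py | validate_springs
-- ===== SOURCE A (Python) =====
-- from typing import List, Tuple, Dict
--
-- def validate_springs(springs: str, rules: List[int]):
--     current = ''
--     groups = []
--     for char in springs:
--         if char == '#':
--             current = current + char
--         elif current:
--             groups.append(current)
--             current = ''
--     if current:
--         groups.append(current)
--     if len(groups) == len(rules):
--         return all([len(group) == rule for group, rule in zip(groups, rules)])
--     return False
-- ===== SOURCE B (Python) =====
-- def validate_springs(springs, rules):
--     normalized = ''.join(c if c == '#' else ' ' for c in springs)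
--     return [len(group) for group in normalized.split()] == rules
-- ===== Notes on version B (the rewrite author's own statement) =====
-- stated objective: idiomatic
-- what changed: Replaces the manual current-buffer scan with end-of-loop flush and the separate length-check-plus-zip/all by normalizing non-'#' chars to spaces, extracting the runs with str.split(), and comparing the length list to rules with one list equality.
import Mathlib
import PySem

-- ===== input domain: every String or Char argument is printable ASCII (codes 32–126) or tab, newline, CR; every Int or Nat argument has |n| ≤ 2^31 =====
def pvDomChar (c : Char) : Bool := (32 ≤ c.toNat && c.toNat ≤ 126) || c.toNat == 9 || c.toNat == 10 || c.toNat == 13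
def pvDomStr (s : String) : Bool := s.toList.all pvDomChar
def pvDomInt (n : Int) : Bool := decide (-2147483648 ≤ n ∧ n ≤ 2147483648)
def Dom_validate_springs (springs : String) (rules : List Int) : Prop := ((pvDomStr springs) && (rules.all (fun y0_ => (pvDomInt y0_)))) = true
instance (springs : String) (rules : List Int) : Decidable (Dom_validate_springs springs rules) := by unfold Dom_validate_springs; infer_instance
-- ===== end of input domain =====

-- B replaces A's manual buffer scan + flush + zip/all check by normalizing non-'#' chars to
-- spaces, splitting on whitespace and comparing the run-length list to rules with one list
-- equality (idiomatic).


-- ===== PORT A =====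
-- loop body of A's `for char in springs` (state = (current, groups))
def pvStepA (st : List Char × List (List Char)) (char : Char) : List Char × List (List Char) :=
  if char == '#' then (st.1 ++ [char], st.2)
  else if !st.1.isEmpty then ([], st.2 ++ [st.1])
  else st

def validate_springs (springs : String) (rules : List Int) : Bool :=
  let st := springs.toList.foldl pvStepA ([], [])
  let groups := if !st.1.isEmpty then st.2 ++ [st.1] else st.2
  if groups.length == rules.length then
    ((groups.zip rules).map (fun gr => ((gr.1.length : Int) == gr.2))).all id
  else false

-- ===== PORT B =====
def validate_springs_alt (springs : String) (rules : List Int) : Bool :=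
  let normalized := springs.toList.map (fun c => if c == '#' then c else ' ')
  decide ((PySem.Chars.split₀ normalized).map (fun group => (group.length : Int)) = rules)

-- ===== PRECONDITION & SPEC =====
def Spec_validate_springs (springs : String) (rules : List Int) (out : Bool) : Prop := out = validate_springs_alt springs rules
instance (springs : String) (rules : List Int) (out : Bool) : Decidable (Spec_validate_springs springs rules out) := by unfold Spec_validate_springs; infer_instance

-- ===== CLAIM (what is proved, stated in full; the proofs are below) =====
def Claim_equal_validate_springs : Prop := ∀ (springs : String) (rules : List Int), Dom_validate_springs springs rules → Spec_validate_springs springs rules (validate_springs springs rules)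

-- ===== LEMMAS AND PROOFS =====

/-- Reference: the group list A finishes with, starting from buffer `cur`. -/
def pvRuns : List Char → List Char → List (List Char)
  | [], cur => if cur.isEmpty then [] else [cur]
  | c :: s, cur =>
    if c == '#' then pvRuns s (cur ++ [c])
    else if !cur.isEmpty then cur :: pvRuns s []
    else pvRuns s []

theorem pvFoldA_eq (s : List Char) : ∀ (cur : List Char) (groups : List (List Char)),
    (if !(s.foldl pvStepA (cur, groups)).1.isEmpty
       then (s.foldl pvStepA (cur, groups)).2 ++ [(s.foldl pvStepA (cur, groups)).1]
       else (s.foldl pvStepA (cur, groups)).2) = groups ++ pvRuns s cur := by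
  induction s with
  | nil =>
    intro cur groups
    simp only [List.foldl_nil, pvRuns]
    by_cases h : cur.isEmpty <;> simp [h]
  | cons c s ih =>
    intro cur groups
    simp only [List.foldl_cons, pvRuns, pvStepA]
    by_cases hc : c == '#'
    · simpa [hc] using ih (cur ++ [c]) groups
    · by_cases hcur : cur.isEmpty
      · have h0 : cur = [] := by simpa [List.isEmpty_iff] using hcur
        subst h0
        simpa [hc] using ih [] groups
      · simpa [hc, hcur] using ih [] (groups ++ [cur])

theorem pvGo_eq (s : List Char) : ∀ (cur : List Char) (acc : List (List Char)),
    PySem.Chars.split₀.go (s.map (fun c => if c == '#' then c else ' ')) cur acc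
      = acc.reverse ++ pvRuns s cur.reverse := by
  induction s with
  | nil =>
    intro cur acc
    simp only [List.map_nil, PySem.Chars.split₀.go, pvRuns]
    by_cases h : cur.reverse.isEmpty
    · have h' : cur.isEmpty := by simpa using h
      simp [h, h']
    · have h' : ¬ cur.isEmpty := by simpa using h
      simp [h, h']
  | cons c s ih =>
    intro cur acc
    by_cases hc : c == '#'
    · have hc' : c = '#' := by simpa using hc
      subst hc'
      have hmap : (('#' :: s).map (fun c => if c == '#' then c else ' '))
          = '#' :: s.map (fun c => if c == '#' then c else ' ') := by simp
      rw [hmap]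
      simp only [PySem.Chars.split₀.go]
      rw [if_neg (by decide)]
      rw [ih ('#' :: cur) acc]
      simp [pvRuns]
    · have hmap : ((c :: s).map (fun c => if c == '#' then c else ' '))
          = ' ' :: s.map (fun c => if c == '#' then c else ' ') := by
        rw [List.map_cons, if_neg hc]
      rw [hmap]
      simp only [PySem.Chars.split₀.go]
      rw [if_pos (by decide)]
      simp only [pvRuns, hc, Bool.false_eq_true, if_false]
      by_cases hcur : cur.isEmpty
      · have h' : cur = [] := by simpa [List.isEmpty_iff] using hcur
        subst h'
        rw [if_pos (by simp), ih [] acc]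
        simp
      · rw [if_neg (by simpa [List.isEmpty_iff] using hcur), ih [] (cur.reverse :: acc)]
        have h2 : cur.reverse.isEmpty = false := by simpa [Bool.not_eq_true] using hcur
        simp [h2]

theorem pvMapEq_iff (l : List (List Char)) : ∀ (r : List Int),
    decide (l.map (fun group => (group.length : Int)) = r)
      = (if l.length == r.length then ((l.zip r).map (fun gr => ((gr.1.length : Int) == gr.2))).all id else false) := by
  induction l with
  | nil => intro r; cases r <;> simp
  | cons g l ih =>
    intro r
    cases r with
    | nil => simp
    | cons b r =>
      simp only [List.map_cons, List.length_cons, List.zip_cons_cons]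
      by_cases hlen : l.length = r.length
      · by_cases hb : (g.length : Int) = b
        · subst hb
          simp [hlen, ih r, List.all_map]
        · simp [hb, hlen]
      · have : ¬ ((g.length : Int) :: l.map (fun group => (group.length : Int)) = b :: r) := by
          intro h
          apply hlen
          have := congrArg List.length h
          simpa using this
        simp [this, hlen]

-- ===== VERDICT (by name: the statement is the Claim_ definition above) =====
theorem validate_springs_spec : Claim_equal_validate_springs := by
  intro springs rules _
  unfold Spec_validate_springs
  have hb : validate_springs_alt springs rules
      = decide ((pvRuns springs.toList []).map (fun group => (group.length : Int)) = rules) := by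
    unfold validate_springs_alt
    simp only [PySem.Chars.split₀, pvGo_eq, List.reverse_nil, List.nil_append]
  have ha : validate_springs springs rules
      = (if (pvRuns springs.toList []).length == rules.length
          then (((pvRuns springs.toList []).zip rules).map (fun gr => ((gr.1.length : Int) == gr.2))).all id
          else false) := by
    unfold validate_springs
    have h := pvFoldA_eq springs.toList [] []
    rw [List.nil_append] at h
    simp only [h]
  rw [ha, hb, pvMapEq_iff]
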